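-- pv_equiv track=rewrite | github.com/hail-is/hail | src/test/resources/de_novo_finder_3.py | split_Fam
-- ===== SOURCE A (Python) =====
-- def split_Fam(Fam_dict, labels):
--     "Split the family dictionary into a female vs male children"
--
--     fem_Fam = {}
--     male_Fam = {}
--     female_kid = ['N' for i in range(9, len(labels))]
--     male_kid = ['N' for i in range(9, len(labels))]
--
--     for family, fam_info in Fam_dict.items():
--         if fam_info[2] == 1:  # male
--             male_Fam[family] = fam_info
--         elif fam_info[2] == 2:  # female
--             fem_Fam[family] = fam_info
--         else:
--             continue
--
--     for idx in range(9, len(labels)):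
--         if idx in fem_Fam.keys():
--             female_kid[idx - 9] = 'Y'
--         elif idx in male_Fam.keys():
--             male_kid[idx - 9] = 'Y'
--         else:
--             continue
--
--     return (fem_Fam, female_kid, male_Fam, male_kid)
-- ===== SOURCE B (Python) =====
-- def split_Fam(Fam_dict, labels):
--     "Split the family dictionary into a female vs male children"
--
--     fem_Fam = {}
--     male_Fam = {}
--     n = len(labels)
--     width = max(n - 9, 0)
--     female_kid = ['N'] * width
--     male_kid = ['N'] * width
--
--     # one pass: route each family and mark its kid slot in the same step
--     window = range(9, n)
--     for family, fam_info in Fam_dict.items():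
--         sex = fam_info[2]
--         if sex == 1:  # male
--             male_Fam[family] = fam_info
--             if family in window:
--                 male_kid[family - 9] = 'Y'
--         elif sex == 2:  # female
--             fem_Fam[family] = fam_info
--             if family in window:
--                 female_kid[family - 9] = 'Y'
--
--     return (fem_Fam, female_kid, male_Fam, male_kid)
-- ===== Notes on version B (the rewrite author's own statement) =====
-- stated objective: simpler
-- what changed: B routes each family and marks its Y/N kid slot in a single pass over Fam_dict.items(), eliminating A's second loop that scans every position in range(9, len(labels)) against the two dicts.
import Mathlib
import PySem

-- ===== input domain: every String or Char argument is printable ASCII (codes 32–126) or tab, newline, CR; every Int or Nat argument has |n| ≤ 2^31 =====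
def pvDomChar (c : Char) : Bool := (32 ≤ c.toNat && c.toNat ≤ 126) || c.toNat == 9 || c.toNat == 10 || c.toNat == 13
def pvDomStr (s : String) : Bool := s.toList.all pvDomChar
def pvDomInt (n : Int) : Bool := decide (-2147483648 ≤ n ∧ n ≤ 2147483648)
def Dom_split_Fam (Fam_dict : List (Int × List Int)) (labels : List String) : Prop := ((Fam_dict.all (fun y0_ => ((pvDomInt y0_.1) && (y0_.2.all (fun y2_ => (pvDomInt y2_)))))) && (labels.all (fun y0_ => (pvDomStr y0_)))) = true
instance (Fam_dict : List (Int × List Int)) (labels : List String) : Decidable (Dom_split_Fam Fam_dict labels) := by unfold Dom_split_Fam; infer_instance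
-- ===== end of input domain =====

-- B does the whole job in ONE pass over the family dict (routing each family and marking its
-- kid slot in the same step), instead of A's second position-scanning loop over range(9, len(labels)).


-- ===== PORT A =====
def split_Fam (Fam_dict : List (Int × List Int)) (labels : List String) : (List (Int × List Int)) × List String × (List (Int × List Int)) × List String :=
  let n : Int := (labels.length : Int)
  -- female_kid = ['N' for i in range(9, len(labels))]; male_kid likewise
  let female_kid : List String := (PySem.List.pyRange 9 n 1).map (fun _ => "N")
  let male_kid : List String := (PySem.List.pyRange 9 n 1).map (fun _ => "N")
  -- first loop: route each family into male_Fam / fem_Fam by fam_info[2]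
  let fm : PySem.Dict Int (List Int) × PySem.Dict Int (List Int) :=
    Fam_dict.foldl
      (fun fm p =>
        if PySem.List.pyGetD p.2 2 0 = 1 then (fm.1, fm.2.insert p.1 p.2)
        else if PySem.List.pyGetD p.2 2 0 = 2 then (fm.1.insert p.1 p.2, fm.2)
        else fm)
      (PySem.Dict.empty, PySem.Dict.empty)
  -- second loop: for idx in range(9, len(labels)) mark the kid lists
  let kids : List String × List String :=
    (PySem.List.pyRange 9 n 1).foldl
      (fun kk idx =>
        if fm.1.contains idx then (PySem.List.pySetD kk.1 (idx - 9) "Y", kk.2)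
        else if fm.2.contains idx then (kk.1, PySem.List.pySetD kk.2 (idx - 9) "Y")
        else kk)
      (female_kid, male_kid)
  ((fm.1).items, kids.1, (fm.2).items, kids.2)

-- ===== PORT B =====
def split_Fam_alt (Fam_dict : List (Int × List Int)) (labels : List String) : (List (Int × List Int)) × List String × (List (Int × List Int)) × List String :=
  let n : Int := (labels.length : Int)
  let width : Int := max (n - 9) 0
  -- one pass: state = (fem_Fam, female_kid, male_Fam, male_kid)
  let st : PySem.Dict Int (List Int) × List String × PySem.Dict Int (List Int) × List String :=
    Fam_dict.foldl
      (fun st p =>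
        let sex := PySem.List.pyGetD p.2 2 0
        if sex = 1 then
          (st.1, st.2.1, st.2.2.1.insert p.1 p.2,
           if 9 ≤ p.1 ∧ p.1 < n then PySem.List.pySetD st.2.2.2 (p.1 - 9) "Y" else st.2.2.2)
        else if sex = 2 then
          (st.1.insert p.1 p.2,
           if 9 ≤ p.1 ∧ p.1 < n then PySem.List.pySetD st.2.1 (p.1 - 9) "Y" else st.2.1,
           st.2.2.1, st.2.2.2)
        else st)
      (PySem.Dict.empty, List.replicate width.toNat "N", PySem.Dict.empty, List.replicate width.toNat "N")
  ((st.1).items, st.2.1, (st.2.2.1).items, st.2.2.2)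

-- ===== PRECONDITION & SPEC =====
-- Pre_ excludes (a) family records shorter than 3, on which fam_info[2] raises IndexError in A,
-- and (b) association lists with duplicate keys, which do not encode a Python dict (A's actual
-- argument is a dict, whose keys are unique).
def Pre_split_Fam (Fam_dict : List (Int × List Int)) (labels : List String) : Prop :=
  (∀ p ∈ Fam_dict, 3 ≤ p.2.length) ∧ (Fam_dict.map Prod.fst).Nodup
instance (Fam_dict : List (Int × List Int)) (labels : List String) : Decidable (Pre_split_Fam Fam_dict labels) := by unfold Pre_split_Fam; infer_instance

def pvWitness_split_Fam : (List (Int × List Int)) × List String :=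
  ([(9, [1, 2, 2]), (3, [0, 1, 1])], ["a", "b", "c", "d", "e", "f", "g", "h", "i", "j"])

def Spec_split_Fam (Fam_dict : List (Int × List Int)) (labels : List String) (out : (List (Int × List Int)) × List String × (List (Int × List Int)) × List String) : Prop := out = split_Fam_alt Fam_dict labels
instance (Fam_dict : List (Int × List Int)) (labels : List String) (out : (List (Int × List Int)) × List String × (List (Int × List Int)) × List String) : Decidable (Spec_split_Fam Fam_dict labels out) := by unfold Spec_split_Fam; infer_instance

-- ===== CLAIM (what is proved, stated in full; the proofs are below) =====
def Claim_equal_split_Fam : Prop := ∀ (Fam_dict : List (Int × List Int)) (labels : List String), Dom_split_Fam Fam_dict labels → Pre_split_Fam Fam_dict labels → Spec_split_Fam Fam_dict labels (split_Fam Fam_dict labels)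

-- ===== LEMMAS AND PROOFS =====

-- the female (resp. male) dictionary both programs build
def pvFemD (l : List (Int × List Int)) : PySem.Dict Int (List Int) :=
  l.foldl (fun d p => if PySem.List.pyGetD p.2 2 0 = 2 then d.insert p.1 p.2 else d) PySem.Dict.empty
def pvMaleD (l : List (Int × List Int)) : PySem.Dict Int (List Int) :=
  l.foldl (fun d p => if PySem.List.pyGetD p.2 2 0 = 1 then d.insert p.1 p.2 else d) PySem.Dict.empty
-- the initial all-'N' kid list
def pvInit (labels : List String) : List String :=
  List.replicate ((labels.length : Int) - 9).toNat "N"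

-- membership in a conditional-insert dict fold
lemma pv_contains_fold (c : (Int × List Int) → Prop) [DecidablePred c]
    (l : List (Int × List Int)) (d : PySem.Dict Int (List Int)) (k : Int) :
    ((l.foldl (fun d p => if c p then d.insert p.1 p.2 else d) d).contains k = true)
      ↔ (d.contains k = true ∨ ∃ p ∈ l, c p ∧ p.1 = k) := by
  induction l generalizing d with
  | nil => simp
  | cons a l ih =>
    simp only [List.foldl_cons]
    by_cases h : c a
    · rw [if_pos h, ih]
      simp only [PySem.Dict.contains_insert, Bool.or_eq_true, beq_iff_eq,
        List.exists_mem_cons_iff]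
      constructor
      · rintro ((h1 | h1) | h2)
        · exact Or.inr (Or.inl ⟨h, h1.symm⟩)
        · exact Or.inl h1
        · exact Or.inr (Or.inr h2)
      · rintro (h1 | (⟨-, h2⟩ | h2))
        · exact Or.inl (Or.inr h1)
        · exact Or.inl (Or.inl h2.symm)
        · exact Or.inr h2
    · rw [if_neg h, ih]
      simp [h]
  
-- length is preserved by a conditional set-'Y' fold
lemma pv_setFold_length {α : Type} (L : List α) (key : α → Int) (c : α → Prop) [DecidablePred c]
    (l0 : List String) :
    (L.foldl (fun l a => if c a then PySem.List.pySetD l (key a - 9) "Y" else l) l0).length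
      = l0.length := by
  induction L generalizing l0 with
  | nil => rfl
  | cons a L ih =>
    simp only [List.foldl_cons]
    by_cases h : c a
    · rw [if_pos h, ih, PySem.List.length_pySetD]
    · rw [if_neg h, ih]

-- contents of a conditional set-'Y' fold, slot by slot
lemma pv_setFold_getD {α : Type} (L : List α) (key : α → Int) (c : α → Prop) [DecidablePred c]
    (h9 : ∀ a ∈ L, c a → 9 ≤ key a) (l0 : List String) (j : Nat) (hj : j < l0.length) :
    (L.foldl (fun l a => if c a then PySem.List.pySetD l (key a - 9) "Y" else l) l0).getD j ""
      = if (∃ a ∈ L, c a ∧ key a = 9 + (j : Int)) then "Y" else l0.getD j "" := by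
  induction L generalizing l0 with
  | nil => simp
  | cons a L ih =>
    simp only [List.foldl_cons]
    by_cases hc : c a
    · rw [if_pos hc]
      have h9a : (0 : Int) ≤ key a - 9 := by have := h9 a (by simp) hc; omega
      rw [PySem.List.pySetD_of_nonneg _ _ h9a,
        ih (fun x hx hcx => h9 x (by simp [hx]) hcx) _ (by simpa using hj)]
      by_cases hk : key a = 9 + (j : Int)
      · have hjt : (key a - 9).toNat = j := by omega
        have hset : (l0.set (key a - 9).toNat "Y").getD j "" = "Y" := by
          rw [hjt, List.getD_eq_getElem _ _ (by simpa using hj)]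
          simp
        rw [hset]
        have hex : ∃ x ∈ a :: L, c x ∧ key x = 9 + (j : Int) := ⟨a, by simp, hc, hk⟩
        rw [if_pos hex]
        split <;> rfl
      · have hjt : (key a - 9).toNat ≠ j := by omega
        have hset : (l0.set (key a - 9).toNat "Y").getD j "" = l0.getD j "" := by
          rw [List.getD_eq_getElem?_getD, List.getD_eq_getElem?_getD,
            List.getElem?_set_ne hjt]
        rw [hset]
        apply if_congr _ rfl rfl
        rw [List.exists_mem_cons_iff]
        simp [hk]
    · rw [if_neg hc, ih (fun x hx hcx => h9 x (by simp [hx]) hcx) _ hj]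
      apply if_congr _ rfl rfl
      rw [List.exists_mem_cons_iff]
      simp [hc]

-- A's first loop splits into the two dictionary folds
lemma pvA_dictfold (l : List (Int × List Int)) (d : PySem.Dict Int (List Int) × PySem.Dict Int (List Int)) :
    l.foldl
      (fun fm p =>
        if PySem.List.pyGetD p.2 2 0 = 1 then (fm.1, fm.2.insert p.1 p.2)
        else if PySem.List.pyGetD p.2 2 0 = 2 then (fm.1.insert p.1 p.2, fm.2)
        else fm) d
    = (l.foldl (fun d p => if PySem.List.pyGetD p.2 2 0 = 2 then d.insert p.1 p.2 else d) d.1,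
       l.foldl (fun d p => if PySem.List.pyGetD p.2 2 0 = 1 then d.insert p.1 p.2 else d) d.2) := by
  induction l generalizing d with
  | nil => rfl
  | cons a l ih =>
    simp only [List.foldl_cons]
    by_cases h1 : PySem.List.pyGetD a.2 2 0 = 1
    · simp [h1, ih]
    · by_cases h2 : PySem.List.pyGetD a.2 2 0 = 2 <;> simp [h1, h2, ih]

-- A's second loop splits into the two kid-list folds
lemma pvA_kidfold (fem male : PySem.Dict Int (List Int)) (L : List Int) (t : List String × List String) :
    L.foldl
      (fun kk idx =>
        if fem.contains idx then (PySem.List.pySetD kk.1 (idx - 9) "Y", kk.2)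
        else if male.contains idx then (kk.1, PySem.List.pySetD kk.2 (idx - 9) "Y")
        else kk) t
    = (L.foldl (fun l idx => if fem.contains idx = true then PySem.List.pySetD l (idx - 9) "Y" else l) t.1,
       L.foldl (fun l idx => if (¬ fem.contains idx = true ∧ male.contains idx = true) then PySem.List.pySetD l (idx - 9) "Y" else l) t.2) := by
  induction L generalizing t with
  | nil => rfl
  | cons a L ih =>
    simp only [List.foldl_cons]
    by_cases h1 : fem.contains a = true <;> by_cases h2 : male.contains a = true <;>
      simp [h1, h2, ih]

-- B's single loop splits into its four component folds
lemma pvB_fold (l : List (Int × List Int)) (n : Int)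
    (st : PySem.Dict Int (List Int) × List String × PySem.Dict Int (List Int) × List String) :
    l.foldl
      (fun st p =>
        let sex := PySem.List.pyGetD p.2 2 0
        if sex = 1 then
          (st.1, st.2.1, st.2.2.1.insert p.1 p.2,
           if 9 ≤ p.1 ∧ p.1 < n then PySem.List.pySetD st.2.2.2 (p.1 - 9) "Y" else st.2.2.2)
        else if sex = 2 then
          (st.1.insert p.1 p.2,
           if 9 ≤ p.1 ∧ p.1 < n then PySem.List.pySetD st.2.1 (p.1 - 9) "Y" else st.2.1,
           st.2.2.1, st.2.2.2)
        else st) st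
    = (l.foldl (fun d p => if PySem.List.pyGetD p.2 2 0 = 2 then d.insert p.1 p.2 else d) st.1,
       l.foldl (fun t p => if (PySem.List.pyGetD p.2 2 0 = 2 ∧ 9 ≤ p.1 ∧ p.1 < n) then PySem.List.pySetD t (p.1 - 9) "Y" else t) st.2.1,
       l.foldl (fun d p => if PySem.List.pyGetD p.2 2 0 = 1 then d.insert p.1 p.2 else d) st.2.2.1,
       l.foldl (fun t p => if (PySem.List.pyGetD p.2 2 0 = 1 ∧ 9 ≤ p.1 ∧ p.1 < n) then PySem.List.pySetD t (p.1 - 9) "Y" else t) st.2.2.2) := by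
  induction l generalizing st with
  | nil => rfl
  | cons a l ih =>
    simp only [List.foldl_cons]
    by_cases h1 : PySem.List.pyGetD a.2 2 0 = 1
    · simp [h1, ih]
    · by_cases h2 : PySem.List.pyGetD a.2 2 0 = 2 <;> simp [h1, h2, ih]

lemma pvInit_eq (labels : List String) :
    (PySem.List.pyRange 9 (labels.length : Int) 1).map (fun _ => "N") = pvInit labels := by
  rw [PySem.List.pyRange_one, pvInit, List.map_map]
  simp [List.eq_replicate_iff]

lemma pvInit_eq' (labels : List String) :
    List.replicate (max ((labels.length : Int) - 9) 0).toNat "N" = pvInit labels := by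
  rw [pvInit]
  congr 1
  omega

-- with unique keys, a family lands in at most one of the two dictionaries
lemma pv_disjoint (l : List (Int × List Int)) (hnd : (l.map Prod.fst).Nodup) (k : Int)
    (hf : (pvFemD l).contains k = true) : (pvMaleD l).contains k = false := by
  rw [pvFemD, pv_contains_fold] at hf
  by_contra hm
  rw [Bool.not_eq_false, pvMaleD, pv_contains_fold] at hm
  simp only [PySem.Dict.contains_empty, Bool.false_eq_true, false_or] at hf hm
  obtain ⟨p, hp, hp2, hpk⟩ := hf
  obtain ⟨q, hq, hq2, hqk⟩ := hm
  have := List.inj_on_of_nodup_map hnd hp hq (by rw [hpk, hqk])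
  rw [this] at hp2
  omega

theorem pv_main (Fam_dict : List (Int × List Int)) (labels : List String)
    (hpre : Pre_split_Fam Fam_dict labels) :
    split_Fam Fam_dict labels = split_Fam_alt Fam_dict labels := by
  obtain ⟨-, hnd⟩ := hpre
  have hW : (pvInit labels).length = ((labels.length : Int) - 9).toNat := by
    rw [pvInit, List.length_replicate]
  -- bound on kid-list indices
  have hjlt : ∀ j : Nat, j < (pvInit labels).length → 9 + (j : Int) < (labels.length : Int) := by
    intro j hj; rw [hW] at hj; omega
  simp only [split_Fam, split_Fam_alt]
  rw [pvInit_eq, pvInit_eq', pvA_dictfold, pvB_fold, pvA_kidfold]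
  refine Prod.ext rfl (Prod.ext ?_ (Prod.ext rfl ?_))
  · -- female kid lists
    show List.foldl
        (fun l idx => if (pvFemD Fam_dict).contains idx = true then PySem.List.pySetD l (idx - 9) "Y" else l)
        (pvInit labels) (PySem.List.pyRange 9 (labels.length : Int) 1)
      = List.foldl
        (fun t p => if (PySem.List.pyGetD p.2 2 0 = 2 ∧ 9 ≤ p.1 ∧ p.1 < (labels.length : Int)) then PySem.List.pySetD t (p.1 - 9) "Y" else t)
        (pvInit labels) Fam_dict
    apply List.ext_getElem
    · rw [pv_setFold_length (PySem.List.pyRange 9 (labels.length : Int) 1) (fun idx => idx)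
          (fun idx => (pvFemD Fam_dict).contains idx = true),
        pv_setFold_length Fam_dict (fun p => p.1)
          (fun p => PySem.List.pyGetD p.2 2 0 = 2 ∧ 9 ≤ p.1 ∧ p.1 < (labels.length : Int))]
    · intro j h1 h2
      have h2' := h2
      rw [pv_setFold_length Fam_dict (fun p => p.1)
          (fun p => PySem.List.pyGetD p.2 2 0 = 2 ∧ 9 ≤ p.1 ∧ p.1 < (labels.length : Int))] at h2'
      rw [← List.getD_eq_getElem _ "" h1, ← List.getD_eq_getElem _ "" h2]
      rw [pv_setFold_getD (PySem.List.pyRange 9 (labels.length : Int) 1)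
            (fun idx => idx) (fun idx => (pvFemD Fam_dict).contains idx = true)
            (fun idx hidx _ => (PySem.List.mem_pyRange_one.mp hidx).1) _ j h2',
          pv_setFold_getD Fam_dict (fun p => p.1)
            (fun p => PySem.List.pyGetD p.2 2 0 = 2 ∧ 9 ≤ p.1 ∧ p.1 < (labels.length : Int))
            (fun p _ hc => hc.2.1) _ j h2']
      apply if_congr _ rfl rfl
      have hjn := hjlt j h2'
      have hmid : (∃ a ∈ PySem.List.pyRange 9 (labels.length : Int) 1,
            (pvFemD Fam_dict).contains a = true ∧ a = 9 + (j : Int))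
          ↔ (pvFemD Fam_dict).contains (9 + (j : Int)) = true := by
        constructor
        · rintro ⟨a, -, ha, rfl⟩; exact ha
        · intro h
          exact ⟨9 + (j : Int), PySem.List.mem_pyRange_one.mpr ⟨by omega, hjn⟩, h, rfl⟩
      rw [hmid, pvFemD, pv_contains_fold]
      simp only [PySem.Dict.contains_empty, Bool.false_eq_true, false_or]
      constructor
      · rintro ⟨p, hp, hp2, hpk⟩
        exact ⟨p, hp, ⟨hp2, by omega, by omega⟩, hpk⟩
      · rintro ⟨p, hp, ⟨hp2, -, -⟩, hpk⟩
        exact ⟨p, hp, hp2, hpk⟩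
  · -- male kid lists
    show List.foldl
        (fun l idx => if (¬ (pvFemD Fam_dict).contains idx = true ∧ (pvMaleD Fam_dict).contains idx = true) then PySem.List.pySetD l (idx - 9) "Y" else l)
        (pvInit labels) (PySem.List.pyRange 9 (labels.length : Int) 1)
      = List.foldl
        (fun t p => if (PySem.List.pyGetD p.2 2 0 = 1 ∧ 9 ≤ p.1 ∧ p.1 < (labels.length : Int)) then PySem.List.pySetD t (p.1 - 9) "Y" else t)
        (pvInit labels) Fam_dict
    apply List.ext_getElem
    · rw [pv_setFold_length (PySem.List.pyRange 9 (labels.length : Int) 1) (fun idx => idx)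
          (fun idx => ¬ (pvFemD Fam_dict).contains idx = true ∧ (pvMaleD Fam_dict).contains idx = true),
        pv_setFold_length Fam_dict (fun p => p.1)
          (fun p => PySem.List.pyGetD p.2 2 0 = 1 ∧ 9 ≤ p.1 ∧ p.1 < (labels.length : Int))]
    · intro j h1 h2
      have h2' := h2
      rw [pv_setFold_length Fam_dict (fun p => p.1)
          (fun p => PySem.List.pyGetD p.2 2 0 = 1 ∧ 9 ≤ p.1 ∧ p.1 < (labels.length : Int))] at h2'
      rw [← List.getD_eq_getElem _ "" h1, ← List.getD_eq_getElem _ "" h2]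
      rw [pv_setFold_getD (PySem.List.pyRange 9 (labels.length : Int) 1)
            (fun idx => idx)
            (fun idx => ¬ (pvFemD Fam_dict).contains idx = true ∧ (pvMaleD Fam_dict).contains idx = true)
            (fun idx hidx _ => (PySem.List.mem_pyRange_one.mp hidx).1) _ j h2',
          pv_setFold_getD Fam_dict (fun p => p.1)
            (fun p => PySem.List.pyGetD p.2 2 0 = 1 ∧ 9 ≤ p.1 ∧ p.1 < (labels.length : Int))
            (fun p _ hc => hc.2.1) _ j h2']
      apply if_congr _ rfl rfl
      have hjn := hjlt j h2'
      have hmid : (∃ a ∈ PySem.List.pyRange 9 (labels.length : Int) 1,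
            (¬ (pvFemD Fam_dict).contains a = true ∧ (pvMaleD Fam_dict).contains a = true) ∧ a = 9 + (j : Int))
          ↔ (pvMaleD Fam_dict).contains (9 + (j : Int)) = true := by
        constructor
        · rintro ⟨a, -, ha, rfl⟩; exact ha.2
        · intro h
          have hdisj : ¬ (pvFemD Fam_dict).contains (9 + (j : Int)) = true := by
            intro hf
            have := pv_disjoint Fam_dict hnd _ hf
            rw [h] at this
            exact absurd this (by simp)
          exact ⟨9 + (j : Int), PySem.List.mem_pyRange_one.mpr ⟨by omega, hjn⟩, ⟨hdisj, h⟩, rfl⟩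
      rw [hmid, pvMaleD, pv_contains_fold]
      simp only [PySem.Dict.contains_empty, Bool.false_eq_true, false_or]
      constructor
      · rintro ⟨p, hp, hp1, hpk⟩
        exact ⟨p, hp, ⟨hp1, by omega, by omega⟩, hpk⟩
      · rintro ⟨p, hp, ⟨hp1, -, -⟩, hpk⟩
        exact ⟨p, hp, hp1, hpk⟩

-- ===== VERDICT (by name: the statement is the Claim_ definition above) =====
theorem split_Fam_spec : Claim_equal_split_Fam := by
  intro Fam_dict labels _ hpre
  unfold Spec_split_Fam
  exact pv_main Fam_dict labels hpre
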